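-- pv_equiv track=rewrite | github.com/vinteger/roman-numeral-kata | roman_numerals.py | _rightmost_between_5_and_9
-- ===== SOURCE A (Python) =====
-- ONE = 'I'
--
-- FIVE = 'V'
--
-- def _rightmost_between_5_and_9(number):
--     digit = FIVE
--     i = 5
--     if 5 < number < 9:
--         while i < number:
--             digit += ONE
--             i += 1
--     return digit
-- ===== SOURCE B (Python) =====
-- ONE = 'I'
--
-- FIVE = 'V'
--
-- def _rightmost_between_5_and_9(number):
--     if 5 < number < 9:
--         return FIVE + ONE * (number - 5)
--     return FIVE
-- ===== Notes on version B (the rewrite author's own statement) =====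
-- stated objective: simpler
-- what changed: Replaces the counter-driven while loop that appends 'I' one at a time with a closed-form string multiplication 'V' + 'I'*(number-5).
import Mathlib
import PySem

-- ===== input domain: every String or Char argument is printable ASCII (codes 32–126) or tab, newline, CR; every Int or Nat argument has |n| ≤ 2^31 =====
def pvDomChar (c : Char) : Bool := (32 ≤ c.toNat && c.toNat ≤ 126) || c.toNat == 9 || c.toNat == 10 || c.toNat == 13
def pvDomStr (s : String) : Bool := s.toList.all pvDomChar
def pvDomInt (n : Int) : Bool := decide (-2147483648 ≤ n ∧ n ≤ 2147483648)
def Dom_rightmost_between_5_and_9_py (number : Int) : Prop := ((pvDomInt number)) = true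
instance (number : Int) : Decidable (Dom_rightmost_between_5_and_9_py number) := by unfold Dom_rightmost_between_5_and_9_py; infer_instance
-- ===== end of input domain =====

-- B replaces A's counter-driven while loop with the closed form "V" ++ "I" * (number - 5) (objective: simpler).


-- ===== PORT A =====
-- A: digit = "V"; i = 5; if 5 < number < 9: while i < number: digit += "I"; i += 1
def pvALoop (number : Int) (digit : String) (i : Int) : String :=
  if i < number then pvALoop number (digit ++ "I") (i + 1) else digit
termination_by (number - i).toNat
decreasing_by
  have : number - (i + 1) < number - i := by omega
  omega

def rightmost_between_5_and_9_py (number : Int) : String :=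
  let digit := "V"
  if 5 < number ∧ number < 9 then pvALoop number digit 5 else digit

-- ===== PORT B =====
-- B: closed form, "V" + "I" * (number - 5)
def rightmost_between_5_and_9_py_alt (number : Int) : String :=
  if 5 < number ∧ number < 9 then "V" ++ String.ofList (List.replicate (number - 5).toNat 'I') else "V"

-- ===== PRECONDITION & SPEC =====
def Spec_rightmost_between_5_and_9_py (number : Int) (out : String) : Prop := out = rightmost_between_5_and_9_py_alt number
instance (number : Int) (out : String) : Decidable (Spec_rightmost_between_5_and_9_py number out) := by unfold Spec_rightmost_between_5_and_9_py; infer_instance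

-- ===== CLAIM (what is proved, stated in full; the proofs are below) =====
def Claim_equal_rightmost_between_5_and_9_py : Prop := ∀ (number : Int), Dom_rightmost_between_5_and_9_py number → Spec_rightmost_between_5_and_9_py number (rightmost_between_5_and_9_py number)

-- ===== LEMMAS AND PROOFS =====

-- ===== VERDICT (by name: the statement is the Claim_ definition above) =====
theorem rightmost_between_5_and_9_py_spec : Claim_equal_rightmost_between_5_and_9_py := by
  intro number _
  unfold Spec_rightmost_between_5_and_9_py rightmost_between_5_and_9_py rightmost_between_5_and_9_py_alt
  by_cases h : 5 < number ∧ number < 9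
  · have h689 : number = 6 ∨ number = 7 ∨ number = 8 := by omega
    rcases h689 with h6 | h7 | h8 <;> subst_vars <;> simp only [if_pos h] <;>
      rw [pvALoop, pvALoop, pvALoop, pvALoop] <;> norm_num <;> decide
  · simp [h]
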